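-- pv_equiv track=rewrite | github.com/tianye-chen/Osu-mania-RL-agent | helper.py | preprocess_actions
-- ===== SOURCE A (Python) =====
-- def preprocess_actions(actions):
--     """
--     Preprocess actions into shape [4,4,4,4]
--     """
--     key_hold = [False] * 4
--     map_key = {"s": 0, "d" : 1, "k" : 2, "l" : 3}
--     clean_actions = []
--     for i in range(len(actions)):
--         chars = actions[i]
--         action = [0, 0, 0, 0]
--
--         if chars == []:
--             clean_actions.append(action)
--             continue
--
--         for char in chars:
--             key = map_key.get(char)
--             if key is None:
--                 continue
--
--             if not key_hold[key]:
--                 action[key] = 2 # press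
--             else:
--                 action[key] = 3 # hold
--
--             if i + 1 < len(actions):
--                 if char not in actions[i+1]:
--                     if key_hold[key]:
--                         action[key] = 1 # release
--                         key_hold[key] = False
--                 else:
--                     key_hold[key] = True
--                     action[key] = 3 # hold
--
--         clean_actions.append(action)
--
--     return clean_actions
-- ===== SOURCE B (Python) =====
-- def preprocess_actions(actions):
--     """
--     Preprocess actions into shape [4,4,4,4]
--     """
--     def lane(ch):
--         col = []
--         hold = False
--         n = len(actions)
--         for i, chars in enumerate(actions):
--             a = 0
--             for c in chars:
--                 if c != ch:
--                     continue
--                 a = 3 if hold else 2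
--                 if i + 1 < n:
--                     if ch in actions[i + 1]:
--                         hold = True
--                         a = 3
--                     elif hold:
--                         a = 1
--                         hold = False
--             col.append(a)
--         return col
--
--     return [list(row) for row in zip(*(lane(ch) for ch in ("s", "d", "k", "l")))]
-- ===== Notes on version B (the rewrite author's own statement) =====
-- stated objective: alternative
-- what changed: B computes the table lane-by-lane: for each of the four keys it walks the rows once with a single hold flag producing a column, then transposes the four columns, instead of A's single row-by-row pass threading a 4-element hold vector and building each row in place.
import Mathlib
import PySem

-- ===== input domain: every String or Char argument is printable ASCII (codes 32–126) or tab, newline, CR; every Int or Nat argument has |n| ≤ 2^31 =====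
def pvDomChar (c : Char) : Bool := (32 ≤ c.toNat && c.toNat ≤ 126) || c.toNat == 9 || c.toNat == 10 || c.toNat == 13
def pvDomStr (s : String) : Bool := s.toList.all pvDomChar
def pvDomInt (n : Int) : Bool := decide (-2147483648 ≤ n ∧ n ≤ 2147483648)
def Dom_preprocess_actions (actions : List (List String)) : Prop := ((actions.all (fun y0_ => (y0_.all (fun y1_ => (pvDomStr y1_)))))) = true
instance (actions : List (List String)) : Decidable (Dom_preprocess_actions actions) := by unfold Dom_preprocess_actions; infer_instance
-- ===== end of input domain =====

-- B recomputes the table lane-by-lane (one hold flag per key, then a 4-way zip) instead of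
-- A's row-by-row pass over a 4-bool state vector; objective: alternative decomposition, same cost.

-- ===== PORT A =====
-- map_key = {"s": 0, "d": 1, "k": 2, "l": 3}
def pvMapKey : PySem.Dict String Int := PySem.Dict.mk [("s", 0), ("d", 1), ("k", 2), ("l", 3)]

-- the body of A's inner `for char in chars` loop (state = (action, key_hold));
-- next? = actions[i+1] when i+1 < len(actions), none on the last row
def pvStepA (next? : Option (List String)) (st : List Int × List Bool) (c : String) :
    List Int × List Bool :=
  match pvMapKey.get? c with
  | none => st
  | some ki =>
    let k := ki.toNat
    let action := st.1.set k (if st.2.getD k false then 3 else 2)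
    match next? with
    | none => (action, st.2)
    | some nxt =>
      if c ∉ nxt then
        if st.2.getD k false then (action.set k 1, st.2.set k false) else (action, st.2)
      else (action.set k 3, st.2.set k true)

-- A's `for i in range(len(actions))` loop; actions[i+1] is the head of the remaining rows
def pvGoA (key_hold : List Bool) : List (List String) → List (List Int)
  | [] => []
  | chars :: rest =>
    if chars = [] then ([0, 0, 0, 0] : List Int) :: pvGoA key_hold rest
    else
      let res := chars.foldl (pvStepA rest.head?) (([0, 0, 0, 0] : List Int), key_hold)
      res.1 :: pvGoA res.2 rest

def preprocess_actions (actions : List (List String)) : List (List Int) :=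
  pvGoA [false, false, false, false] actions

-- ===== PORT B =====
-- body of B's inner loop for one lane letter ch (state = (a, hold))
def pvStepB (next? : Option (List String)) (ch : String) (st : Int × Bool) (c : String) :
    Int × Bool :=
  if c ≠ ch then st
  else
    let a : Int := if st.2 then 3 else 2
    match next? with
    | none => (a, st.2)
    | some nxt =>
      if ch ∈ nxt then (3, true)
      else if st.2 then (1, false) else (a, st.2)

-- B's per-lane column: walk the rows with a single hold flag
def pvLane (ch : String) (hold : Bool) : List (List String) → List Int
  | [] => []
  | chars :: rest =>
    let res := chars.foldl (pvStepB rest.head? ch) ((0 : Int), hold)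
    res.1 :: pvLane ch res.2 rest

-- zip(*cols) for the four columns
def pvZip4 : List Int → List Int → List Int → List Int → List (List Int)
  | a :: as, b :: bs, c :: cs, d :: ds => [a, b, c, d] :: pvZip4 as bs cs ds
  | _, _, _, _ => []

def preprocess_actions_alt (actions : List (List String)) : List (List Int) :=
  pvZip4 (pvLane "s" false actions) (pvLane "d" false actions)
         (pvLane "k" false actions) (pvLane "l" false actions)

-- ===== PRECONDITION & SPEC =====
def Spec_preprocess_actions (actions : List (List String)) (out : List (List Int)) : Prop := out = preprocess_actions_alt actions
instance (actions : List (List String)) (out : List (List Int)) : Decidable (Spec_preprocess_actions actions out) := by unfold Spec_preprocess_actions; infer_instance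

-- ===== CLAIM (what is proved, stated in full; the proofs are below) =====
def Claim_equal_preprocess_actions : Prop := ∀ (actions : List (List String)), Dom_preprocess_actions actions → Spec_preprocess_actions actions (preprocess_actions actions)

-- ===== LEMMAS AND PROOFS =====

-- one step of A's inner loop acts componentwise, lane by lane
theorem pvStepA_components (next? : Option (List String)) (c : String)
    (a0 a1 a2 a3 : Int) (h0 h1 h2 h3 : Bool) :
    pvStepA next? ([a0, a1, a2, a3], [h0, h1, h2, h3]) c =
      ([(pvStepB next? "s" (a0, h0) c).1, (pvStepB next? "d" (a1, h1) c).1,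
        (pvStepB next? "k" (a2, h2) c).1, (pvStepB next? "l" (a3, h3) c).1],
       [(pvStepB next? "s" (a0, h0) c).2, (pvStepB next? "d" (a1, h1) c).2,
        (pvStepB next? "k" (a2, h2) c).2, (pvStepB next? "l" (a3, h3) c).2]) := by
  by_cases hs : c = "s"
  · subst hs; cases next? with
    | none => cases h0 <;> simp [pvStepA, pvStepB, pvMapKey, PySem.Dict.get?_mk_cons]
    | some nxt =>
      by_cases hm : "s" ∈ nxt <;> cases h0 <;>
        simp [pvStepA, pvStepB, pvMapKey, PySem.Dict.get?_mk_cons, hm]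
  by_cases hd : c = "d"
  · subst hd; cases next? with
    | none => cases h1 <;> simp [pvStepA, pvStepB, pvMapKey, PySem.Dict.get?_mk_cons]
    | some nxt =>
      by_cases hm : "d" ∈ nxt <;> cases h1 <;>
        simp [pvStepA, pvStepB, pvMapKey, PySem.Dict.get?_mk_cons, hm]
  by_cases hk : c = "k"
  · subst hk; cases next? with
    | none => cases h2 <;> simp [pvStepA, pvStepB, pvMapKey, PySem.Dict.get?_mk_cons]
    | some nxt =>
      by_cases hm : "k" ∈ nxt <;> cases h2 <;>
        simp [pvStepA, pvStepB, pvMapKey, PySem.Dict.get?_mk_cons, hm]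
  by_cases hl : c = "l"
  · subst hl; cases next? with
    | none => cases h3 <;> simp [pvStepA, pvStepB, pvMapKey, PySem.Dict.get?_mk_cons]
    | some nxt =>
      by_cases hm : "l" ∈ nxt <;> cases h3 <;>
        simp [pvStepA, pvStepB, pvMapKey, PySem.Dict.get?_mk_cons, hm]
  · simp [pvStepA, pvStepB, pvMapKey, 
      Ne.symm hs, Ne.symm hd, Ne.symm hk, Ne.symm hl, hs, hd, hk, hl, PySem.Dict.get?]

-- A's inner fold over a row decomposes into the four lane folds of B
theorem pvFold_components (chars : List String) (next? : Option (List String))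
    (a0 a1 a2 a3 : Int) (h0 h1 h2 h3 : Bool) :
    chars.foldl (pvStepA next?) ([a0, a1, a2, a3], [h0, h1, h2, h3]) =
      ([(chars.foldl (pvStepB next? "s") (a0, h0)).1, (chars.foldl (pvStepB next? "d") (a1, h1)).1,
        (chars.foldl (pvStepB next? "k") (a2, h2)).1, (chars.foldl (pvStepB next? "l") (a3, h3)).1],
       [(chars.foldl (pvStepB next? "s") (a0, h0)).2, (chars.foldl (pvStepB next? "d") (a1, h1)).2,
        (chars.foldl (pvStepB next? "k") (a2, h2)).2, (chars.foldl (pvStepB next? "l") (a3, h3)).2]) := by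
  induction chars generalizing a0 a1 a2 a3 h0 h1 h2 h3 with
  | nil => simp
  | cons c cs ih =>
    simp only [List.foldl_cons, pvStepA_components]
    exact ih _ _ _ _ _ _ _ _

theorem pvGoA_eq_zip4 (rows : List (List String)) (h0 h1 h2 h3 : Bool) :
    pvGoA [h0, h1, h2, h3] rows =
      pvZip4 (pvLane "s" h0 rows) (pvLane "d" h1 rows)
             (pvLane "k" h2 rows) (pvLane "l" h3 rows) := by
  induction rows generalizing h0 h1 h2 h3 with
  | nil => simp [pvGoA, pvLane, pvZip4]
  | cons chars rest ih =>
    by_cases hc : chars = []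
    · subst hc
      simp [pvGoA, pvLane, pvZip4, ih]
    · simp only [pvGoA, pvLane, if_neg hc, pvFold_components, pvZip4]
      exact congrArg _ (ih _ _ _ _)

-- ===== VERDICT (by name: the statement is the Claim_ definition above) =====
theorem preprocess_actions_spec : Claim_equal_preprocess_actions := by
  intro actions _
  show preprocess_actions actions = preprocess_actions_alt actions
  exact pvGoA_eq_zip4 actions false false false false
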